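-- pv_equiv track=rewrite | github.com/julius-ingeli/my-projects | python/training/training.py | f9
-- ===== SOURCE A (Python) =====
-- def f9(A):
--     sumcols = []
--     for i in range(len(A)):
--         col = [row[i]for row in A]
--         sumcol = sum(col)
--         sumcols.append(sumcol)
--
--     maxcol = max(sumcols)
--     maxcolind = sumcols.index(maxcol)
--     return maxcolind
-- ===== SOURCE B (Python) =====
-- def f9(A):
--     n = len(A)
--     sums = [0] * n
--     for row in A:
--         sums = [s + row[i] for i, s in enumerate(sums)]
--     maxcol = max(sums)
--     return sums.index(maxcol)
-- ===== Notes on version B (the rewrite author's own statement) =====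
-- stated objective: alternative
-- what changed: B accumulates all column sums in one row-major pass over the rows (updating a sums vector per row) instead of A's column-major pass that rebuilds and sums each column separately.
import Mathlib
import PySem

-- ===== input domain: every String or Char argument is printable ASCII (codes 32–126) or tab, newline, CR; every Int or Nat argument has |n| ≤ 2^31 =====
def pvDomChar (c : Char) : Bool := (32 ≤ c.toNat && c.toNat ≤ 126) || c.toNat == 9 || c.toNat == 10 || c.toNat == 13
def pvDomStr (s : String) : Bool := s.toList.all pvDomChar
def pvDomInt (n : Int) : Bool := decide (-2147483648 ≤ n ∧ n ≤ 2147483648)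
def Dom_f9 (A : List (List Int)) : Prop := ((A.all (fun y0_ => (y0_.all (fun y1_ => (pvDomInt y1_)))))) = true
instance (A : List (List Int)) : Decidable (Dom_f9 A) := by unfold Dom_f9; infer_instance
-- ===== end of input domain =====

-- B accumulates all column sums in one row-major pass over the rows, instead of A's column-major pass that rebuilds each column; return values agree on all non-raising inputs.


-- ===== PORT A =====
-- for i in range(len(A)): col = [row[i] for row in A]; sumcols.append(sum(col)); then max / .index
def f9 (A : List (List Int)) : Int :=
  let sumcols : List Int :=
    (PySem.List.pyRange 0 (A.length : Int) 1).foldl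
      (fun acc i =>
        let col := A.map (fun row => PySem.List.pyGetD row i 0)  -- row[i]; IndexError excluded by Pre_
        acc ++ [col.sum]) []
  match PySem.List.max? sumcols (fun x => x) with
  | none => 0  -- max([]) raises ValueError; excluded by Pre_
  | some maxcol =>
    match PySem.List.index? sumcols maxcol with
    | none => 0
    | some k => (k : Int)

-- ===== PORT B =====
-- sums = [0]*n; for row in A: sums = [s + row[i] for i, s in enumerate(sums)]; then max / .index
def f9_alt (A : List (List Int)) : Int :=
  let n := A.length
  let sums : List Int :=
    A.foldl
      (fun s row =>
        (PySem.List.enumerate s 0).map (fun p => p.2 + PySem.List.pyGetD row p.1 0))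
      (List.replicate n 0)
  match PySem.List.max? sums (fun x => x) with
  | none => 0
  | some m =>
    match PySem.List.index? sums m with
    | none => 0
    | some k => (k : Int)

-- ===== PRECONDITION & SPEC =====
-- Pre_ excludes exactly the inputs on which the Python A raises: the empty matrix (ValueError from
-- max([])) and matrices with a row shorter than len(A) (IndexError on row[i]).
def Pre_f9 (A : List (List Int)) : Prop := A ≠ [] ∧ ∀ row ∈ A, A.length ≤ row.length
instance (A : List (List Int)) : Decidable (Pre_f9 A) := by unfold Pre_f9; infer_instance
def pvWitness_f9 : List (List Int) := [[1, 2], [3, 4]]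
def Spec_f9 (A : List (List Int)) (out : Int) : Prop := out = f9_alt A
instance (A : List (List Int)) (out : Int) : Decidable (Spec_f9 A out) := by unfold Spec_f9; infer_instance

-- ===== CLAIM (what is proved, stated in full; the proofs are below) =====
def Claim_equal_f9 : Prop := ∀ (A : List (List Int)), Dom_f9 A → Pre_f9 A → Spec_f9 A (f9 A)

-- ===== LEMMAS AND PROOFS =====

-- the sum of column i (entries read with pyGetD, as both ports do)
def pvColSum (A : List (List Int)) (i : Int) : Int :=
  (A.map (fun row => PySem.List.pyGetD row i 0)).sum

def pvStep (s : List Int) (row : List Int) : List Int :=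
  (PySem.List.enumerate s 0).map (fun p => p.2 + PySem.List.pyGetD row p.1 0)

lemma pvStep_length (s row : List Int) : (pvStep s row).length = s.length := by
  simp [pvStep, PySem.List.length_enumerate]

lemma pvStep_getElem (s row : List Int) (k : Nat) (hk : k < s.length) :
    (pvStep s row)[k]'(by simpa [pvStep_length] using hk)
      = s[k] + PySem.List.pyGetD row (k : Int) 0 := by
  simp [pvStep, PySem.List.getElem_enumerate]

lemma pvFold_length (L : List (List Int)) (s : List Int) :
    (L.foldl pvStep s).length = s.length := by
  induction L generalizing s with
  | nil => rfl
  | cons r L ih => simp [List.foldl_cons, ih, pvStep_length]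

lemma pvFold_getElem (L : List (List Int)) (s : List Int) (k : Nat) (hk : k < s.length) :
    (L.foldl pvStep s)[k]'(by simpa [pvFold_length] using hk)
      = s[k] + pvColSum L (k : Int) := by
  induction L generalizing s with
  | nil => simp [pvColSum]
  | cons r L ih =>
    have hk' : k < (pvStep s r).length := by simpa [pvStep_length] using hk
    calc ((r :: L).foldl pvStep s)[k]'(by simpa [pvFold_length, pvStep_length] using hk)
        = (pvStep s r)[k]'hk' + pvColSum L (k : Int) := ih (pvStep s r) hk'
      _ = s[k] + pvColSum (r :: L) (k : Int) := by
          rw [pvStep_getElem s r k hk]; simp [pvColSum]; ring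

lemma pvSums_eq (A : List (List Int)) :
    A.foldl (fun s row =>
        (PySem.List.enumerate s 0).map (fun p => p.2 + PySem.List.pyGetD row p.1 0))
        (List.replicate A.length 0)
      = (PySem.List.pyRange 0 (A.length : Int) 1).foldl
          (fun acc i => acc ++ [(A.map (fun row => PySem.List.pyGetD row i 0)).sum]) [] := by
  show A.foldl pvStep (List.replicate A.length 0) = _
  rw [PySem.List.foldl_append_singleton_eq_map, PySem.List.pyRange_zero_natCast]
  apply List.ext_getElem
  · simp [pvFold_length]
  · intro k h1 h2
    have hk : k < (List.replicate A.length (0 : Int)).length := by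
      simpa [pvFold_length] using h1
    have := pvFold_getElem A (List.replicate A.length 0) k hk
    simp only [List.getElem_replicate, zero_add] at this
    simp [this, pvColSum]

-- ===== VERDICT (by name: the statement is the Claim_ definition above) =====
theorem f9_spec : Claim_equal_f9 := by
  intro A _ _
  show f9 A = f9_alt A
  simp only [f9, f9_alt]
  rw [pvSums_eq]
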